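-- pv_equiv track=rewrite | github.com/microsoft/ExACT | exact/run_utils.py | _process_raw_action_for_html
-- ===== SOURCE A (Python) =====
-- def _process_raw_action_for_html(raw_response_str: str):
--     special_word_replacement = {
--         "<think>": "&lt;think&gt;",
--         "</think>": "&lt;/think&gt;",
--         "<action>": "&lt;action&gt;",
--         "</action>": "&lt;/action&gt;",
--     }
--     for k, v in special_word_replacement.items():
--         raw_response_str = raw_response_str.replace(k, v)
--     return raw_response_str
-- ===== SOURCE B (Python) =====
-- def _process_raw_action_for_html(raw_response_str: str):
--     special_word_replacement = {
--         "<think>": "&lt;think&gt;",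
--         "</think>": "&lt;/think&gt;",
--         "<action>": "&lt;action&gt;",
--         "</action>": "&lt;/action&gt;",
--     }
--     out = []
--     i = 0
--     n = len(raw_response_str)
--     while i < n:
--         for k, v in special_word_replacement.items():
--             if raw_response_str.startswith(k, i):
--                 out.append(v)
--                 i += len(k)
--                 break
--         else:
--             out.append(raw_response_str[i])
--             i += 1
--     return "".join(out)
-- ===== Notes on version B (the rewrite author's own statement) =====
-- stated objective: alternative
-- what changed: Replaces A's four sequential str.replace passes over the whole string with a single left-to-right scan that matches any of the four tags at each position and emits the replacement, so the input is traversed once instead of four times.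
import Mathlib
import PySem

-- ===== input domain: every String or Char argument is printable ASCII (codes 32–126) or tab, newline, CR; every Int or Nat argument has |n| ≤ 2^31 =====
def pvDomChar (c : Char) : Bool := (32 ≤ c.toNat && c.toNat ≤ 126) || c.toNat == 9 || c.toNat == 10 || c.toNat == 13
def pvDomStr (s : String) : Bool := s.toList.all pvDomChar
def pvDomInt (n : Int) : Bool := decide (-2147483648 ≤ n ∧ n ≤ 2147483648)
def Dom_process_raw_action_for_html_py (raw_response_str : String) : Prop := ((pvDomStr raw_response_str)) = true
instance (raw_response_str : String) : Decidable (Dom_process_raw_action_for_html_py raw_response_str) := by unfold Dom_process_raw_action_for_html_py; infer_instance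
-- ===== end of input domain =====

-- B replaces A's four sequential str.replace passes with a single left-to-right scan
-- matching the four tags at each position (alternative decomposition; one traversal instead of four).

-- ===== PORT A =====
-- literal transliteration: four str.replace passes in dict-insertion order
def process_raw_action_for_html_py (raw_response_str : String) : String :=
  let s1 := PySem.Str.replace raw_response_str "<think>" "&lt;think&gt;"
  let s2 := PySem.Str.replace s1 "</think>" "&lt;/think&gt;"
  let s3 := PySem.Str.replace s2 "<action>" "&lt;action&gt;"
  PySem.Str.replace s3 "</action>" "&lt;/action&gt;"

-- ===== PORT B =====
-- the four (tag, replacement) pairs of Source B's dict, in insertion order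
def pvTag1 : List Char := ['<','t','h','i','n','k','>']
def pvRep1 : List Char := ['&','l','t',';','t','h','i','n','k','&','g','t',';']
def pvTag2 : List Char := ['<','/','t','h','i','n','k','>']
def pvRep2 : List Char := ['&','l','t',';','/','t','h','i','n','k','&','g','t',';']
def pvTag3 : List Char := ['<','a','c','t','i','o','n','>']
def pvRep3 : List Char := ['&','l','t',';','a','c','t','i','o','n','&','g','t',';']
def pvTag4 : List Char := ['<','/','a','c','t','i','o','n','>']
def pvRep4 : List Char := ['&','l','t',';','/','a','c','t','i','o','n','&','g','t',';']

-- Source B's while loop: at each position try the four tags in dict order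
-- (startswith(k, i) → isPrefixOf on the remaining suffix), else copy one char
def pvAltScan : List Char → List Char
  | [] => []
  | c :: t =>
    if _h1 : pvTag1.isPrefixOf (c :: t) then pvRep1 ++ pvAltScan ((c :: t).drop pvTag1.length)
    else if _h2 : pvTag2.isPrefixOf (c :: t) then pvRep2 ++ pvAltScan ((c :: t).drop pvTag2.length)
    else if _h3 : pvTag3.isPrefixOf (c :: t) then pvRep3 ++ pvAltScan ((c :: t).drop pvTag3.length)
    else if _h4 : pvTag4.isPrefixOf (c :: t) then pvRep4 ++ pvAltScan ((c :: t).drop pvTag4.length)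
    else c :: pvAltScan t
termination_by l => l.length
decreasing_by
  all_goals simp_all [pvTag1, pvTag2, pvTag3, pvTag4]

def process_raw_action_for_html_py_alt (raw_response_str : String) : String :=
  String.ofList (pvAltScan raw_response_str.toList)

-- ===== PRECONDITION & SPEC =====
def Spec_process_raw_action_for_html_py (raw_response_str : String) (out : String) : Prop := out = process_raw_action_for_html_py_alt raw_response_str
instance (raw_response_str : String) (out : String) : Decidable (Spec_process_raw_action_for_html_py raw_response_str out) := by unfold Spec_process_raw_action_for_html_py; infer_instance

-- ===== CLAIM (what is proved, stated in full; the proofs are below) =====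
def Claim_equal_process_raw_action_for_html_py : Prop := ∀ (raw_response_str : String), Dom_process_raw_action_for_html_py raw_response_str → Spec_process_raw_action_for_html_py raw_response_str (process_raw_action_for_html_py raw_response_str)

-- ===== LEMMAS AND PROOFS =====

-- fuel-indexed single-token scanner mirroring PySem.Chars.replace.go without the accumulator
def pvScan1 (old new : List Char) : Nat → List Char → List Char
  | _, [] => []
  | 0, l => l
  | fuel+1, c :: t =>
    if old.isPrefixOf (c :: t) then new ++ pvScan1 old new fuel ((c :: t).drop old.length)
    else c :: pvScan1 old new fuel t

-- fuel-free single-token scanner (the characterization of one str.replace pass)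
def pvScanTok (old new : List Char) : List Char → List Char
  | [] => []
  | c :: t =>
    if h : old.isPrefixOf (c :: t) = true ∧ old ≠ [] then new ++ pvScanTok old new ((c :: t).drop old.length)
    else c :: pvScanTok old new t
termination_by l => l.length
decreasing_by
  · have hle : old.length ≤ (c :: t).length := (List.isPrefixOf_iff_prefix.mp h.1).length_le
    have h1 : 1 ≤ old.length := by
      cases old with
      | nil => exact absurd rfl h.2
      | cons _ _ => simp
    simp only [List.length_drop]
    omega
  · simp

theorem pvGo_eq_scan1 (old new : List Char) (fuel : Nat) :
    ∀ (l acc : List Char), PySem.Chars.replace.go old new fuel l acc = acc.reverse ++ pvScan1 old new fuel l := by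
  induction fuel with
  | zero =>
    intro l acc
    cases l with
    | nil => rw [PySem.Chars.replace.go]; simp [pvScan1]
    | cons c t => rw [PySem.Chars.replace.go]; simp [pvScan1]
  | succ fuel ih =>
    intro l acc
    cases l with
    | nil =>
      rw [PySem.Chars.replace.go]
      simp [pvScan1]
      omega
    | cons c t =>
      rw [PySem.Chars.replace.go]
      by_cases h : old.isPrefixOf (c :: t) = true
      · simp only [h, if_true, pvScan1, ih]
        simp
      · simp only [h, if_false, Bool.false_eq_true, pvScan1, ih]
        simp

theorem pvScan1_eq_scanTok (old new : List Char) (hne : old ≠ []) :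
    ∀ (fuel : Nat) (l : List Char), l.length ≤ fuel → pvScan1 old new fuel l = pvScanTok old new l := by
  intro fuel
  induction fuel with
  | zero =>
    intro l hl
    cases l with
    | nil => simp [pvScan1, pvScanTok]
    | cons c t => simp at hl
  | succ fuel ih =>
    intro l hl
    cases l with
    | nil => simp [pvScan1, pvScanTok]
    | cons c t =>
      rw [pvScan1, pvScanTok]
      by_cases h : old.isPrefixOf (c :: t) = true
      · have hle : old.length ≤ (c :: t).length := (List.isPrefixOf_iff_prefix.mp h).length_le
        have h1 : 1 ≤ old.length := by
          cases old with
          | nil => exact absurd rfl hne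
          | cons _ _ => simp
        rw [if_pos h, dif_pos ⟨h, hne⟩, ih]
        simp only [List.length_drop]
        simp at hl ⊢
        omega
      · rw [if_neg h, dif_neg (by simp [h]), ih]
        simp at hl
        omega

-- one str.replace pass IS the single-token scan
theorem pvReplace_eq_scanTok (old new l : List Char) (hne : old ≠ []) :
    PySem.Chars.replace l old new = pvScanTok old new l := by
  rw [PySem.Chars.replace]
  rw [if_neg (by simp [hne])]
  rw [pvGo_eq_scan1, pvScan1_eq_scanTok old new hne l.length l le_rfl]
  simp

theorem pvScanTok_match (old new l : List Char) (hne : old ≠ []) (h : old.isPrefixOf l = true) :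
    pvScanTok old new l = new ++ pvScanTok old new (l.drop old.length) := by
  cases l with
  | nil =>
    cases old with
    | nil => exact absurd rfl hne
    | cons _ _ => simp [List.isPrefixOf] at h
  | cons c t => rw [pvScanTok, dif_pos ⟨h, hne⟩]

theorem pvScanTok_head_ne (old new t : List Char) (c : Char) (h : old.isPrefixOf (c :: t) = false) :
    pvScanTok old new (c :: t) = c :: pvScanTok old new t := by
  rw [pvScanTok, dif_neg (by simp [h])]

-- a token starting with '<' never fires inside a '<'-free block: the block passes through
theorem pvScanTok_append (old' new u x : List Char) (hu : '<' ∉ u) :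
    pvScanTok ('<' :: old') new (u ++ x) = u ++ pvScanTok ('<' :: old') new x := by
  induction u with
  | nil => simp
  | cons d u' ih =>
    have hd : ('<' :: old').isPrefixOf (d :: (u' ++ x)) = false := by
      have : ¬ ('<' = d) := fun h => hu (h ▸ List.mem_cons_self)
      simp [List.isPrefixOf, this]
    rw [List.cons_append, pvScanTok_head_ne _ _ _ _ hd, ih (fun h => hu (List.mem_cons_of_mem _ h))]
    simp

-- a '<'- and '&'-free prefix is unaffected by a scan pass
theorem pvScanTok_prefix_iff (old' new' : List Char) :
    ∀ (r v : List Char), '<' ∉ v → '&' ∉ v →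
      v.isPrefixOf (pvScanTok ('<' :: old') ('&' :: new') r) = v.isPrefixOf r := by
  intro r
  induction r with
  | nil => intro v _ _; simp [pvScanTok]
  | cons c t ih =>
    intro v hv1 hv2
    by_cases h : ('<' :: old').isPrefixOf (c :: t) = true
    · have h' := h
      simp only [List.isPrefixOf, Bool.and_eq_true, beq_iff_eq] at h'
      obtain ⟨hc, -⟩ := h'
      rw [pvScanTok_match _ _ _ (by simp) h]
      cases v with
      | nil => simp [List.isPrefixOf]
      | cons a v' =>
        have ha1 : (a == '&') = false := by
          simp only [beq_eq_false_iff_ne, ne_eq]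
          exact fun he => hv2 (he ▸ List.mem_cons_self)
        have ha2 : (a == '<') = false := by
          simp only [beq_eq_false_iff_ne, ne_eq]
          exact fun he => hv1 (he ▸ List.mem_cons_self)
        simp [List.isPrefixOf, ← hc, ha1, ha2]
    · have h' : ('<' :: old').isPrefixOf (c :: t) = false := Bool.eq_false_iff.mpr h
      rw [pvScanTok_head_ne _ _ _ _ h']
      cases v with
      | nil => simp [List.isPrefixOf]
      | cons a v' =>
        simp only [List.isPrefixOf]
        rw [ih v' (fun hm => hv1 (List.mem_cons_of_mem _ hm)) (fun hm => hv2 (List.mem_cons_of_mem _ hm))]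

-- tails of the tags after their leading '<', and the literal decompositions
def pvTl1 : List Char := ['t','h','i','n','k','>']
def pvTl2 : List Char := ['/','t','h','i','n','k','>']
def pvTl3 : List Char := ['a','c','t','i','o','n','>']
def pvTl4 : List Char := ['/','a','c','t','i','o','n','>']

theorem pvTag1_eq : pvTag1 = '<' :: pvTl1 := rfl
theorem pvTag2_eq : pvTag2 = '<' :: pvTl2 := rfl
theorem pvTag3_eq : pvTag3 = '<' :: pvTl3 := rfl
theorem pvTag4_eq : pvTag4 = '<' :: pvTl4 := rfl

theorem pvPreConsCons (a : Char) (as bs : List Char) : (a :: as).isPrefixOf (a :: bs) = as.isPrefixOf bs := by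
  simp [List.isPrefixOf]

theorem pvPreConsNe (a b : Char) (as bs : List Char) (h : ¬ a = b) : (a :: as).isPrefixOf (b :: bs) = false := by
  simp [List.isPrefixOf, h]

-- the tags are pairwise non-overlapping: no tag is a prefix of a string beginning with a different tag
theorem pvNo23 (y : List Char) : pvTag2.isPrefixOf (pvTag3 ++ y) = false := by
  simp [pvTag2, pvTag3, List.isPrefixOf]

theorem pvNo24 (y : List Char) : pvTag2.isPrefixOf (pvTag4 ++ y) = false := by
  simp [pvTag2, pvTag4, List.isPrefixOf]

theorem pvNo34 (y : List Char) : pvTag3.isPrefixOf (pvTag4 ++ y) = false := by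
  simp [pvTag3, pvTag4, List.isPrefixOf]

-- MAIN LEMMA: the four sequential single-token scans equal the one-pass four-token scan
theorem pvMainAux : ∀ (n : Nat) (l : List Char), l.length ≤ n →
    pvScanTok pvTag4 pvRep4 (pvScanTok pvTag3 pvRep3 (pvScanTok pvTag2 pvRep2 (pvScanTok pvTag1 pvRep1 l))) = pvAltScan l := by
  intro n
  induction n with
  | zero =>
    intro l hl
    have : l = [] := List.eq_nil_of_length_eq_zero (Nat.le_zero.mp hl)
    subst this
    simp [pvScanTok, pvAltScan]
  | succ n ih =>
    intro l hl
    cases l with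
    | nil => simp [pvScanTok, pvAltScan]
    | cons c t =>
      by_cases h1 : pvTag1.isPrefixOf (c :: t) = true
      · -- "<think>" matches here
        obtain ⟨x, hx⟩ := List.isPrefixOf_iff_prefix.mp h1
        have hxl : x.length ≤ n := by
          have := congrArg List.length hx
          simp [pvTag1] at this
          simp at hl
          omega
        rw [pvAltScan, dif_pos h1, ← hx, List.drop_left]
        rw [pvScanTok_match pvTag1 pvRep1 _ (by decide)
              (List.isPrefixOf_iff_prefix.mpr (List.prefix_append _ _)), List.drop_left]
        rw [pvTag2_eq, pvScanTok_append pvTl2 pvRep2 pvRep1 _ (by decide), ← pvTag2_eq]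
        rw [pvTag3_eq, pvScanTok_append pvTl3 pvRep3 pvRep1 _ (by decide), ← pvTag3_eq]
        rw [pvTag4_eq, pvScanTok_append pvTl4 pvRep4 pvRep1 _ (by decide), ← pvTag4_eq]
        rw [ih x hxl]
      · by_cases h2 : pvTag2.isPrefixOf (c :: t) = true
        · -- "</think>" matches here
          obtain ⟨x, hx⟩ := List.isPrefixOf_iff_prefix.mp h2
          have hxl : x.length ≤ n := by
            have := congrArg List.length hx
            simp [pvTag2] at this
            simp at hl
            omega
          rw [pvAltScan, dif_neg h1, dif_pos h2, ← hx, List.drop_left]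
          rw [show (pvTag2 ++ x : List Char) = '<' :: (pvTl2 ++ x) from rfl]
          rw [pvScanTok_head_ne pvTag1 pvRep1 _ _ (by rw [← hx] at h1; exact Bool.eq_false_iff.mpr h1)]
          rw [pvTag1_eq, pvScanTok_append pvTl1 pvRep1 pvTl2 _ (by decide), ← pvTag1_eq]
          rw [show ('<' :: (pvTl2 ++ pvScanTok pvTag1 pvRep1 x) : List Char) = pvTag2 ++ pvScanTok pvTag1 pvRep1 x from rfl]
          rw [pvScanTok_match pvTag2 pvRep2 _ (by decide)
                (List.isPrefixOf_iff_prefix.mpr (List.prefix_append _ _)), List.drop_left]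
          rw [pvTag3_eq, pvScanTok_append pvTl3 pvRep3 pvRep2 _ (by decide), ← pvTag3_eq]
          rw [pvTag4_eq, pvScanTok_append pvTl4 pvRep4 pvRep2 _ (by decide), ← pvTag4_eq]
          rw [ih x hxl]
        · by_cases h3 : pvTag3.isPrefixOf (c :: t) = true
          · -- "<action>" matches here
            obtain ⟨x, hx⟩ := List.isPrefixOf_iff_prefix.mp h3
            have hxl : x.length ≤ n := by
              have := congrArg List.length hx
              simp [pvTag3] at this
              simp at hl
              omega
            rw [pvAltScan, dif_neg h1, dif_neg h2, dif_pos h3, ← hx, List.drop_left]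
            rw [show (pvTag3 ++ x : List Char) = '<' :: (pvTl3 ++ x) from rfl]
            rw [pvScanTok_head_ne pvTag1 pvRep1 _ _ (by rw [← hx] at h1; exact Bool.eq_false_iff.mpr h1)]
            rw [pvTag1_eq, pvScanTok_append pvTl1 pvRep1 pvTl3 _ (by decide), ← pvTag1_eq]
            rw [show ('<' :: (pvTl3 ++ pvScanTok pvTag1 pvRep1 x) : List Char) = pvTag3 ++ pvScanTok pvTag1 pvRep1 x from rfl]
            rw [show (pvTag3 ++ pvScanTok pvTag1 pvRep1 x : List Char) = '<' :: (pvTl3 ++ pvScanTok pvTag1 pvRep1 x) from rfl]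
            rw [pvScanTok_head_ne pvTag2 pvRep2 _ _ (by
                  rw [show ('<' :: (pvTl3 ++ pvScanTok pvTag1 pvRep1 x) : List Char) = pvTag3 ++ pvScanTok pvTag1 pvRep1 x from rfl]
                  exact pvNo23 _)]
            rw [pvTag2_eq, pvScanTok_append pvTl2 pvRep2 pvTl3 _ (by decide), ← pvTag2_eq]
            rw [show ('<' :: (pvTl3 ++ pvScanTok pvTag2 pvRep2 (pvScanTok pvTag1 pvRep1 x)) : List Char) = pvTag3 ++ pvScanTok pvTag2 pvRep2 (pvScanTok pvTag1 pvRep1 x) from rfl]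
            rw [pvScanTok_match pvTag3 pvRep3 _ (by decide)
                  (List.isPrefixOf_iff_prefix.mpr (List.prefix_append _ _)), List.drop_left]
            rw [pvTag4_eq, pvScanTok_append pvTl4 pvRep4 pvRep3 _ (by decide), ← pvTag4_eq]
            rw [ih x hxl]
          · by_cases h4 : pvTag4.isPrefixOf (c :: t) = true
            · -- "</action>" matches here
              obtain ⟨x, hx⟩ := List.isPrefixOf_iff_prefix.mp h4
              have hxl : x.length ≤ n := by
                have := congrArg List.length hx
                simp [pvTag4] at this
                simp at hl
                omega
              rw [pvAltScan, dif_neg h1, dif_neg h2, dif_neg h3, dif_pos h4, ← hx, List.drop_left]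
              rw [show (pvTag4 ++ x : List Char) = '<' :: (pvTl4 ++ x) from rfl]
              rw [pvScanTok_head_ne pvTag1 pvRep1 _ _ (by rw [← hx] at h1; exact Bool.eq_false_iff.mpr h1)]
              rw [pvTag1_eq, pvScanTok_append pvTl1 pvRep1 pvTl4 _ (by decide), ← pvTag1_eq]
              rw [show ('<' :: (pvTl4 ++ pvScanTok pvTag1 pvRep1 x) : List Char) = pvTag4 ++ pvScanTok pvTag1 pvRep1 x from rfl]
              rw [show (pvTag4 ++ pvScanTok pvTag1 pvRep1 x : List Char) = '<' :: (pvTl4 ++ pvScanTok pvTag1 pvRep1 x) from rfl]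
              rw [pvScanTok_head_ne pvTag2 pvRep2 _ _ (by
                    rw [show ('<' :: (pvTl4 ++ pvScanTok pvTag1 pvRep1 x) : List Char) = pvTag4 ++ pvScanTok pvTag1 pvRep1 x from rfl]
                    exact pvNo24 _)]
              rw [pvTag2_eq, pvScanTok_append pvTl2 pvRep2 pvTl4 _ (by decide), ← pvTag2_eq]
              rw [pvScanTok_head_ne pvTag3 pvRep3 _ _ (by
                    rw [show ('<' :: (pvTl4 ++ pvScanTok pvTag2 pvRep2 (pvScanTok pvTag1 pvRep1 x)) : List Char) = pvTag4 ++ pvScanTok pvTag2 pvRep2 (pvScanTok pvTag1 pvRep1 x) from rfl]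
                    exact pvNo34 _)]
              rw [pvTag3_eq, pvScanTok_append pvTl3 pvRep3 pvTl4 _ (by decide), ← pvTag3_eq]
              rw [show ('<' :: (pvTl4 ++ pvScanTok pvTag3 pvRep3 (pvScanTok pvTag2 pvRep2 (pvScanTok pvTag1 pvRep1 x))) : List Char) = pvTag4 ++ pvScanTok pvTag3 pvRep3 (pvScanTok pvTag2 pvRep2 (pvScanTok pvTag1 pvRep1 x)) from rfl]
              rw [pvScanTok_match pvTag4 pvRep4 _ (by decide)
                    (List.isPrefixOf_iff_prefix.mpr (List.prefix_append _ _)), List.drop_left]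
              rw [ih x hxl]
            · -- no tag matches at this position: copy one character
              have htl : t.length ≤ n := by simp at hl; omega
              rw [pvAltScan, dif_neg h1, dif_neg h2, dif_neg h3, dif_neg h4]
              by_cases hc : c = '<'
              · subst hc
                have h2' : pvTl2.isPrefixOf t = false := by
                  have := Bool.eq_false_iff.mpr h2
                  rwa [pvTag2_eq, pvPreConsCons] at this
                have h3' : pvTl3.isPrefixOf t = false := by
                  have := Bool.eq_false_iff.mpr h3
                  rwa [pvTag3_eq, pvPreConsCons] at this
                have h4' : pvTl4.isPrefixOf t = false := by
                  have := Bool.eq_false_iff.mpr h4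
                  rwa [pvTag4_eq, pvPreConsCons] at this
                rw [pvScanTok_head_ne pvTag1 pvRep1 _ _ (Bool.eq_false_iff.mpr h1)]
                rw [pvScanTok_head_ne pvTag2 pvRep2 _ _ (by
                      rw [pvTag2_eq, pvPreConsCons, pvTag1_eq,
                          show pvRep1 = '&' :: pvRep1.tail from rfl,
                          pvScanTok_prefix_iff pvTl1 pvRep1.tail t pvTl2 (by decide) (by decide)]
                      exact h2')]
                rw [pvScanTok_head_ne pvTag3 pvRep3 _ _ (by
                      rw [pvTag3_eq, pvPreConsCons,
                          pvTag2_eq, show pvRep2 = '&' :: pvRep2.tail from rfl,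
                          pvScanTok_prefix_iff pvTl2 pvRep2.tail _ pvTl3 (by decide) (by decide),
                          pvTag1_eq, show pvRep1 = '&' :: pvRep1.tail from rfl,
                          pvScanTok_prefix_iff pvTl1 pvRep1.tail t pvTl3 (by decide) (by decide)]
                      exact h3')]
                rw [pvScanTok_head_ne pvTag4 pvRep4 _ _ (by
                      rw [pvTag4_eq, pvPreConsCons,
                          pvTag3_eq, show pvRep3 = '&' :: pvRep3.tail from rfl,
                          pvScanTok_prefix_iff pvTl3 pvRep3.tail _ pvTl4 (by decide) (by decide),
                          pvTag2_eq, show pvRep2 = '&' :: pvRep2.tail from rfl,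
                          pvScanTok_prefix_iff pvTl2 pvRep2.tail _ pvTl4 (by decide) (by decide),
                          pvTag1_eq, show pvRep1 = '&' :: pvRep1.tail from rfl,
                          pvScanTok_prefix_iff pvTl1 pvRep1.tail t pvTl4 (by decide) (by decide)]
                      exact h4')]
                rw [ih t htl]
              · rw [pvScanTok_head_ne pvTag1 pvRep1 _ _ (by rw [pvTag1_eq]; exact pvPreConsNe _ _ _ _ (fun he => hc he.symm))]
                rw [pvScanTok_head_ne pvTag2 pvRep2 _ _ (by rw [pvTag2_eq]; exact pvPreConsNe _ _ _ _ (fun he => hc he.symm))]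
                rw [pvScanTok_head_ne pvTag3 pvRep3 _ _ (by rw [pvTag3_eq]; exact pvPreConsNe _ _ _ _ (fun he => hc he.symm))]
                rw [pvScanTok_head_ne pvTag4 pvRep4 _ _ (by rw [pvTag4_eq]; exact pvPreConsNe _ _ _ _ (fun he => hc he.symm))]
                rw [ih t htl]

-- ===== VERDICT (by name: the statement is the Claim_ definition above) =====
theorem process_raw_action_for_html_py_spec : Claim_equal_process_raw_action_for_html_py := by
  intro s _
  show process_raw_action_for_html_py s = process_raw_action_for_html_py_alt s
  unfold process_raw_action_for_html_py process_raw_action_for_html_py_alt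
  simp only [PySem.Str.replace, String.toList_ofList]
  have e1 : "<think>".toList = pvTag1 := by decide
  have e2 : "</think>".toList = pvTag2 := by decide
  have e3 : "<action>".toList = pvTag3 := by decide
  have e4 : "</action>".toList = pvTag4 := by decide
  have f1 : "&lt;think&gt;".toList = pvRep1 := by decide
  have f2 : "&lt;/think&gt;".toList = pvRep2 := by decide
  have f3 : "&lt;action&gt;".toList = pvRep3 := by decide
  have f4 : "&lt;/action&gt;".toList = pvRep4 := by decide
  rw [e1, e2, e3, e4, f1, f2, f3, f4]
  rw [pvReplace_eq_scanTok pvTag1 pvRep1 _ (by decide),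
      pvReplace_eq_scanTok pvTag2 pvRep2 _ (by decide),
      pvReplace_eq_scanTok pvTag3 pvRep3 _ (by decide),
      pvReplace_eq_scanTok pvTag4 pvRep4 _ (by decide)]
  exact congrArg String.ofList (pvMainAux s.toList.length s.toList le_rfl)
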